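-- pv_equiv track=rewrite | github.com/pypi-data/pypi-mirror-380 | packages/awsquery/awsquery-0.4.0.tar.gz/awsquery-0.4.0/src/awsquery/cli.py | _process_remaining_args
-- ===== SOURCE A (Python) =====
-- SIMPLE_FLAGS = ["-d", "--debug", "-j", "--json", "-k", "--keys", "--allow-unsafe"]
--
-- VALUE_FLAGS = ["--region", "--profile", "-p", "--parameter", "-i", "--input"]
--
-- def _extract_flag_and_value(args, i):
--     """Extract a flag and optionally its value from args list."""
--     flags = []
--     flags.append(args[i])
--     if args[i] in VALUE_FLAGS:
--         if i + 1 < len(args) and not args[i + 1].startswith("-") and args[i + 1] != "--":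
--             flags.append(args[i + 1])
--             return flags, 2  # consumed 2 args
--     return flags, 1  # consumed 1 arg
--
-- def _process_remaining_args(remaining):
--     """Process remaining args, extracting flags from non-flags."""
--     flags = []
--     non_flags = []
--     i = 0
--     while i < len(remaining):
--         arg = remaining[i]
--         if arg in SIMPLE_FLAGS:
--             flags.append(arg)
--             i += 1
--         elif arg in VALUE_FLAGS:
--             extracted, consumed = _extract_flag_and_value(remaining, i)
--             flags.extend(extracted)
--             i += consumed
--         else:
--             non_flags.append(arg)
--             i += 1
--     return flags, non_flags
-- ===== SOURCE B (Python) =====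
-- SIMPLE_FLAGS = ["-d", "--debug", "-j", "--json", "-k", "--keys", "--allow-unsafe"]
--
-- VALUE_FLAGS = ["--region", "--profile", "-p", "--parameter", "-i", "--input"]
--
--
-- def _process_remaining_args(remaining):
--     """Process remaining args, extracting flags from non-flags (single pass with a pending-value state)."""
--     flags = []
--     non_flags = []
--     pending = False
--     for arg in remaining:
--         if pending:
--             pending = False
--             if not arg.startswith("-") and arg != "--":
--                 flags.append(arg)
--                 continue
--         if arg in SIMPLE_FLAGS:
--             flags.append(arg)
--         elif arg in VALUE_FLAGS:
--             flags.append(arg)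
--             pending = True
--         else:
--             non_flags.append(arg)
--     return flags, non_flags
-- ===== Notes on version B (the rewrite author's own statement) =====
-- stated objective: simpler
-- what changed: Replaced the index-based while loop with a two-arg-consuming helper by a single forward for-loop over the args driven by a boolean 'pending' state that captures a value flag's following value.
import Mathlib
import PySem

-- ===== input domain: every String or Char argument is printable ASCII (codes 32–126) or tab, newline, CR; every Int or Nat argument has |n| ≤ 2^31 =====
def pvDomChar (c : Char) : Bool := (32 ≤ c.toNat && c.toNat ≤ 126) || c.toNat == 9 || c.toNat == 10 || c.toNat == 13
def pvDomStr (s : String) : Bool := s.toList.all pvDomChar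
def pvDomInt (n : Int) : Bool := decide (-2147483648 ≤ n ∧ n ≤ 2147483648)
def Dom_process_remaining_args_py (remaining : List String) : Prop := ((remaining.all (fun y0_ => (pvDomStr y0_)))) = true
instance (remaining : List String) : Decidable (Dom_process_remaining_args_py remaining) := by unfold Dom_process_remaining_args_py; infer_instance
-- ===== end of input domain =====

-- B replaces A's index-based while loop + two-arg-consuming helper with one forward pass driven by a boolean pending state (simpler decomposition; same O(n) cost).

-- ===== PORT A =====
def pvSIMPLE_FLAGS : List String := ["-d", "--debug", "-j", "--json", "-k", "--keys", "--allow-unsafe"]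

def pvVALUE_FLAGS : List String := ["--region", "--profile", "-p", "--parameter", "-i", "--input"]

-- port of _extract_flag_and_value: 'args' is the suffix of the list starting at index i
-- (args[i] is its head 'arg', args[i+1] its second element); returns (flags, consumed)
def pvExtractFlagAndValue (arg : String) (rest : List String) : List String × Nat :=
  if arg ∈ pvVALUE_FLAGS then
    match rest with
    | b :: _ =>
      if (!(PySem.Str.startswith b "-")) && (b != "--") then ([arg, b], 2) else ([arg], 1)
    | [] => ([arg], 1)
  else ([arg], 1)

-- the while loop of _process_remaining_args, recursing on the suffix remaining[i:]
def pvGoA : List String → List String × List String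
  | [] => ([], [])
  | arg :: rest =>
    if arg ∈ pvSIMPLE_FLAGS then
      let r := pvGoA rest
      (arg :: r.1, r.2)
    else if arg ∈ pvVALUE_FLAGS then
      let e := pvExtractFlagAndValue arg rest
      let r := pvGoA (rest.drop (e.2 - 1))
      (e.1 ++ r.1, r.2)
    else
      let r := pvGoA rest
      (r.1, arg :: r.2)
termination_by xs => xs.length
decreasing_by all_goals (simp [List.length_drop]; try omega)

def process_remaining_args_py (remaining : List String) : List String × List String :=
  pvGoA remaining

-- ===== PORT B =====
-- one step of B's for-loop; state = (flags, non_flags, pending)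
def pvStepB (st : List String × List String × Bool) (arg : String) : List String × List String × Bool :=
  if st.2.2 && (!(PySem.Str.startswith arg "-")) && (arg != "--") then
    (st.1 ++ [arg], st.2.1, false)
  else if arg ∈ pvSIMPLE_FLAGS then
    (st.1 ++ [arg], st.2.1, false)
  else if arg ∈ pvVALUE_FLAGS then
    (st.1 ++ [arg], st.2.1, true)
  else
    (st.1, st.2.1 ++ [arg], false)

def process_remaining_args_py_alt (remaining : List String) : List String × List String :=
  let st := remaining.foldl pvStepB ([], [], false)
  (st.1, st.2.1)

-- ===== PRECONDITION & SPEC =====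
def Spec_process_remaining_args_py (remaining : List String) (out : List String × List String) : Prop := out = process_remaining_args_py_alt remaining
instance (remaining : List String) (out : List String × List String) : Decidable (Spec_process_remaining_args_py remaining out) := by unfold Spec_process_remaining_args_py; infer_instance

-- ===== CLAIM (what is proved, stated in full; the proofs are below) =====
def Claim_equal_process_remaining_args_py : Prop := ∀ (remaining : List String), Dom_process_remaining_args_py remaining → Spec_process_remaining_args_py remaining (process_remaining_args_py remaining)

-- ===== LEMMAS AND PROOFS =====


theorem pvFold_goA : ∀ (xs flags nfs : List String),
    (let st := xs.foldl pvStepB (flags, nfs, false)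
     (st.1, st.2.1)) = (flags ++ (pvGoA xs).1, nfs ++ (pvGoA xs).2)
  | [], flags, nfs => by simp [pvGoA]
  | arg :: rest, flags, nfs => by
    by_cases hs : arg ∈ pvSIMPLE_FLAGS
    · have := pvFold_goA rest (flags ++ [arg]) nfs
      simp only [List.foldl_cons, pvStepB, hs, pvGoA] at *
      simp_all
    · by_cases hv : arg ∈ pvVALUE_FLAGS
      · -- value flag: B sets pending; split on whether the next arg is a captured value
        match rest with
        | [] =>
          simp [pvGoA, pvExtractFlagAndValue, hs, hv, pvStepB]
        | b :: rest' =>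
          by_cases hok : PySem.Chars.startswith b.toList ['-'] = false ∧ ¬ b = "--"
          · have ih := pvFold_goA rest' (flags ++ [arg, b]) nfs
            simp only [List.foldl_cons, pvStepB, pvGoA, pvExtractFlagAndValue, hs, hv] at *
            simp_all
          · have ih := pvFold_goA (b :: rest') (flags ++ [arg]) nfs
            simp only [List.foldl_cons, pvStepB, pvGoA, pvExtractFlagAndValue, hs, hv] at ih ⊢
            split_ifs at ih ⊢ <;> simp_all [pvGoA, pvExtractFlagAndValue]
      · have := pvFold_goA rest flags (nfs ++ [arg])
        simp only [List.foldl_cons, pvStepB, hs, hv, pvGoA] at *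
        simp_all
termination_by xs => xs.length

-- ===== VERDICT (by name: the statement is the Claim_ definition above) =====
theorem process_remaining_args_py_spec : Claim_equal_process_remaining_args_py := by
  intro remaining _
  unfold Spec_process_remaining_args_py process_remaining_args_py process_remaining_args_py_alt
  have := pvFold_goA remaining [] []
  simpa using this.symm
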